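-- pv_equiv track=rewrite | github.com/babson-org/python-rsail | exercises.py | cartesia
-- ===== SOURCE A (Python) =====
-- def cartesia(lst):
--     if len(lst) != 10: return False
--
--     n = 0
--     e = 0
--     s = 0
--     w = 0
--
--     for l in lst:
--         l = l.upper()
--         if l == 'N': n += 1
--         elif l == 'E': e += 1
--         elif l == 'S': s += 1
--         elif l == 'W': w += 1
--
--     if n == s and e == w : return True
--
--     return False
-- ===== SOURCE B (Python) =====
-- def cartesia(lst):
--     if len(lst) != 10:
--         return False
--     moves = {'N': (1, 0), 'S': (-1, 0), 'E': (0, 1), 'W': (0, -1)}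
--
--     def walk(rest):
--         if not rest:
--             return (0, 0)
--         y, x = walk(rest[1:])
--         dy, dx = moves.get(rest[0].upper(), (0, 0))
--         return (y + dy, x + dx)
--
--     return walk(lst) == (0, 0)
-- ===== Notes on version B (the rewrite author's own statement) =====
-- stated objective: alternative
-- what changed: B treats each letter as a unit vector on the grid and recursively sums the net displacement back-to-front, returning whether the walk ends at the origin, instead of A's iterative four-counter tally compared pairwise; equal N/S and E/W counts is exactly zero net displacement.
import Mathlib
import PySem

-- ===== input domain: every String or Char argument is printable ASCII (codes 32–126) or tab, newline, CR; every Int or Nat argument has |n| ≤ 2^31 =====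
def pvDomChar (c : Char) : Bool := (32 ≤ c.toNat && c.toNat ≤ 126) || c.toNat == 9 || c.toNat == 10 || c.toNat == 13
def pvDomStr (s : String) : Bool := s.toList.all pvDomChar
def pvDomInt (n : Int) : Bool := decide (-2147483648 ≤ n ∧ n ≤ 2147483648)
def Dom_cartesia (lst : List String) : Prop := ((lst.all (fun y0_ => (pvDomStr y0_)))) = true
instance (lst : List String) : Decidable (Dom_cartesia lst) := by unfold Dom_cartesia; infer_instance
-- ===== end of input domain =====

-- ===== PORT A =====
def cartesia (lst : List String) : Bool :=
  if lst.length ≠ 10 then false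
  else
    let st := lst.foldl (fun (acc : Int × Int × Int × Int) l =>
      let l := PySem.Str.upper l
      if l = "N" then (acc.1 + 1, acc.2.1, acc.2.2.1, acc.2.2.2)
      else if l = "E" then (acc.1, acc.2.1 + 1, acc.2.2.1, acc.2.2.2)
      else if l = "S" then (acc.1, acc.2.1, acc.2.2.1 + 1, acc.2.2.2)
      else if l = "W" then (acc.1, acc.2.1, acc.2.2.1, acc.2.2.2 + 1)
      else acc) (0, 0, 0, 0)
    if st.1 = st.2.2.1 ∧ st.2.1 = st.2.2.2 then true else false

-- ===== PORT B =====
-- B reads each letter as a unit vector on the grid, recursively sums the net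
-- displacement back-to-front, and checks the walk ends at the origin.
def cartesiaMoves : PySem.Dict String (Int × Int) :=
  PySem.Dict.ofList [("N", (1, 0)), ("S", (-1, 0)), ("E", (0, 1)), ("W", (0, -1))]

def cartesiaWalk : List String → Int × Int
  | [] => (0, 0)
  | l :: rest =>
      let p := cartesiaWalk rest
      let d := PySem.Dict.getD cartesiaMoves (PySem.Str.upper l) (0, 0)
      (p.1 + d.1, p.2 + d.2)

def cartesia_alt (lst : List String) : Bool :=
  if lst.length ≠ 10 then false
  else decide (cartesiaWalk lst = ((0 : Int), (0 : Int)))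

-- ===== PRECONDITION & SPEC =====
def Spec_cartesia (lst : List String) (out : Bool) : Prop := out = cartesia_alt lst
instance (lst : List String) (out : Bool) : Decidable (Spec_cartesia lst out) := by unfold Spec_cartesia; infer_instance

-- ===== CLAIM (what is proved, stated in full; the proofs are below) =====
def Claim_equal_cartesia : Prop := ∀ (lst : List String), Dom_cartesia lst → Spec_cartesia lst (cartesia lst)

-- ===== LEMMAS AND PROOFS =====

-- A's fold and B's walk, related in one induction: the walk's coordinates are
-- the pairwise differences (N - S, E - W) of the fold's four counter deltas.
lemma cartesia_fold_walk (lst : List String) (n e s w : Int) :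
    (cartesiaWalk lst).1 =
      ((lst.foldl (fun (acc : Int × Int × Int × Int) l =>
        let l := PySem.Str.upper l
        if l = "N" then (acc.1 + 1, acc.2.1, acc.2.2.1, acc.2.2.2)
        else if l = "E" then (acc.1, acc.2.1 + 1, acc.2.2.1, acc.2.2.2)
        else if l = "S" then (acc.1, acc.2.1, acc.2.2.1 + 1, acc.2.2.2)
        else if l = "W" then (acc.1, acc.2.1, acc.2.2.1, acc.2.2.2 + 1)
        else acc) (n, e, s, w)).1 - n) -
      ((lst.foldl (fun (acc : Int × Int × Int × Int) l =>
        let l := PySem.Str.upper l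
        if l = "N" then (acc.1 + 1, acc.2.1, acc.2.2.1, acc.2.2.2)
        else if l = "E" then (acc.1, acc.2.1 + 1, acc.2.2.1, acc.2.2.2)
        else if l = "S" then (acc.1, acc.2.1, acc.2.2.1 + 1, acc.2.2.2)
        else if l = "W" then (acc.1, acc.2.1, acc.2.2.1, acc.2.2.2 + 1)
        else acc) (n, e, s, w)).2.2.1 - s) ∧
    (cartesiaWalk lst).2 =
      ((lst.foldl (fun (acc : Int × Int × Int × Int) l =>
        let l := PySem.Str.upper l
        if l = "N" then (acc.1 + 1, acc.2.1, acc.2.2.1, acc.2.2.2)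
        else if l = "E" then (acc.1, acc.2.1 + 1, acc.2.2.1, acc.2.2.2)
        else if l = "S" then (acc.1, acc.2.1, acc.2.2.1 + 1, acc.2.2.2)
        else if l = "W" then (acc.1, acc.2.1, acc.2.2.1, acc.2.2.2 + 1)
        else acc) (n, e, s, w)).2.1 - e) -
      ((lst.foldl (fun (acc : Int × Int × Int × Int) l =>
        let l := PySem.Str.upper l
        if l = "N" then (acc.1 + 1, acc.2.1, acc.2.2.1, acc.2.2.2)
        else if l = "E" then (acc.1, acc.2.1 + 1, acc.2.2.1, acc.2.2.2)
        else if l = "S" then (acc.1, acc.2.1, acc.2.2.1 + 1, acc.2.2.2)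
        else if l = "W" then (acc.1, acc.2.1, acc.2.2.1, acc.2.2.2 + 1)
        else acc) (n, e, s, w)).2.2.2 - w) := by
  induction lst generalizing n e s w with
  | nil => simp [cartesiaWalk]
  | cons x xs ih =>
      simp only [List.foldl_cons, cartesiaWalk]
      by_cases h1 : PySem.Str.upper x = "N"
      · have hd : PySem.Dict.getD cartesiaMoves "N" ((0:Int),(0:Int)) = (1, 0) := by decide
        have := ih (n + 1) e s w
        simp only [h1, hd] at *
        simp at *
        omega
      · by_cases h2 : PySem.Str.upper x = "E"
        · have hd : PySem.Dict.getD cartesiaMoves "E" ((0:Int),(0:Int)) = (0, 1) := by decide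
          have := ih n (e + 1) s w
          simp only [h2, hd] at *
          simp [h1] at *
          omega
        · by_cases h3 : PySem.Str.upper x = "S"
          · have hd : PySem.Dict.getD cartesiaMoves "S" ((0:Int),(0:Int)) = (-1, 0) := by decide
            have := ih n e (s + 1) w
            simp only [h3, hd] at *
            simp [h1, h2] at *
            omega
          · by_cases h4 : PySem.Str.upper x = "W"
            · have hd : PySem.Dict.getD cartesiaMoves "W" ((0:Int),(0:Int)) = (0, -1) := by decide
              have := ih n e s (w + 1)
              simp only [h4, hd] at *
              simp [h1, h2, h3] at *
              omega
            · have hm : cartesiaMoves =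
                  PySem.Dict.mk [("N", (1, 0)), ("S", (-1, 0)), ("E", (0, 1)), ("W", (0, -1))] := by
                decide
              have hd : PySem.Dict.getD cartesiaMoves (PySem.Str.upper x) ((0:Int),(0:Int)) = (0, 0) := by
                rw [hm]
                simp [PySem.Dict.getD, PySem.Dict.get?,
                  Ne.symm h1, Ne.symm h2, Ne.symm h3, Ne.symm h4]
              have := ih n e s w
              simp only [hd] at *
              simp [h1, h2, h3, h4] at *
              omega

-- ===== VERDICT (by name: the statement is the Claim_ definition above) =====
theorem cartesia_spec : Claim_equal_cartesia := by
  intro lst _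
  unfold Spec_cartesia cartesia cartesia_alt
  by_cases h : lst.length = 10
  · simp only [h, ne_eq, not_true_eq_false, if_false]
    obtain ⟨hl, hr⟩ := cartesia_fold_walk lst 0 0 0 0
    simp only [sub_zero] at hl hr
    split_ifs with hc
    · symm
      simp only [decide_eq_true_eq, Prod.ext_iff]
      omega
    · symm
      simp only [decide_eq_false_iff_not, Prod.ext_iff]
      omega
  · simp [h]
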